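-- pv_equiv track=rewrite | github.com/lexycore/lexed | lexed/editor/__init__.py | consecutive_numbers
-- ===== SOURCE A (Python) =====
-- def consecutive_numbers(num_list):  # Fixes delete bug with non-consecutive selection over 100 lines!
--     """Returns true if list of numbers is consecutive"""
--     num_list.sort()
--     if len(num_list) == 1:
--         return True
--     for i in range(0, len(num_list)):
--         if i != 0 and num_list[i] - num_list[i - 1] != 1:
--             return False
--     return True
-- ===== SOURCE B (Python) =====
-- def consecutive_numbers(num_list):
--     """Returns true if list of numbers is consecutive"""
--     num_list.sort()
--     expected = [num_list[0] + i for i in range(len(num_list))]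
--     return num_list == expected
-- ===== Notes on version B (the rewrite author's own statement) =====
-- stated objective: simpler
-- what changed: Replaces the index loop over adjacent differences with constructing the expected consecutive run from the smallest element and a single list equality; both still sort in place.
import Mathlib
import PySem

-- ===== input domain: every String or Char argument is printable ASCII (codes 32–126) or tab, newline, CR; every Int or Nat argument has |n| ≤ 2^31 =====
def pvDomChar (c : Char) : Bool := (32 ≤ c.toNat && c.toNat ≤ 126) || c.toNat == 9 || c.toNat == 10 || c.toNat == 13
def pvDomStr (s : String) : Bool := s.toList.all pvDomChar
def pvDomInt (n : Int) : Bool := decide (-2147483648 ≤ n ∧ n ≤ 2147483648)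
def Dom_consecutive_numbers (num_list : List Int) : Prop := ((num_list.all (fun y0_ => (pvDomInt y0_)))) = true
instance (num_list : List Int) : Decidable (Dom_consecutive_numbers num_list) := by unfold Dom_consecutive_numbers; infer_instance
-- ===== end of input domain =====

-- B replaces A's adjacent-difference index scan with building the expected consecutive
-- run from the smallest element and one list equality (objective: simpler).
-- Both A and B sort num_list in place; the equivalence proved is about the return value
-- (the in-place mutation is identical in A and B).

-- ===== PORT A =====
-- the 'for i in range(0, len(num_list))' loop with its early 'return False'
def cnLoopA (s : List Int) : List Int → Bool
  | [] => true
  | i :: rest =>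
    if i ≠ 0 ∧ PySem.List.pyGetD s i 0 - PySem.List.pyGetD s (i - 1) 0 ≠ 1 then false
    else cnLoopA s rest

def consecutive_numbers (num_list : List Int) : Bool :=
  let s := PySem.List.sorted num_list (fun x => x)   -- num_list.sort()  (in place in Python)
  if s.length = 1 then true
  else cnLoopA s (PySem.List.pyRange 0 (s.length : Int) 1)
  -- indices drawn from range(0, len) are always in range, so pyGetD's default 0 is never read

-- ===== PORT B =====
def consecutive_numbers_alt (num_list : List Int) : Bool :=
  let s := PySem.List.sorted num_list (fun x => x)   -- num_list.sort()  (in place in Python)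
  -- expected = [num_list[0] + i for i in range(len(num_list))]; on the empty list the
  -- comprehension never indexes, so pyGetD's default 0 is never read
  let expected := (PySem.List.pyRange 0 (s.length : Int) 1).map
      (fun i => PySem.List.pyGetD s 0 0 + i)
  s == expected

-- ===== PRECONDITION & SPEC =====
def Spec_consecutive_numbers (num_list : List Int) (out : Bool) : Prop := out = consecutive_numbers_alt num_list
instance (num_list : List Int) (out : Bool) : Decidable (Spec_consecutive_numbers num_list out) := by unfold Spec_consecutive_numbers; infer_instance

-- ===== CLAIM (what is proved, stated in full; the proofs are below) =====
def Claim_equal_consecutive_numbers : Prop := ∀ (num_list : List Int), Dom_consecutive_numbers num_list → Spec_consecutive_numbers num_list (consecutive_numbers num_list)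

-- ===== LEMMAS AND PROOFS =====

-- A's early-return loop is an 'all' over the index list
lemma cnLoopA_eq_all (s : List Int) (idxs : List Int) :
    cnLoopA s idxs =
      idxs.all (fun i => !(decide (i ≠ 0 ∧ PySem.List.pyGetD s i 0 - PySem.List.pyGetD s (i - 1) 0 ≠ 1))) := by
  induction idxs with
  | nil => rfl
  | cons i rest ih =>
    simp only [cnLoopA, List.all_cons]
    split_ifs with h
    · simp [decide_eq_true h]
    · simp [decide_eq_false h, ih]

-- the adjacent-difference condition is equivalent to the arithmetic-progression condition
lemma adjacent_iff_progression (s : List Int) :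
    (∀ k : Nat, k < s.length → k ≠ 0 → s[k]! - s[k - 1]! = 1) ↔
      (∀ k : Nat, k < s.length → s[k]! = s.getD 0 0 + k) := by
  constructor
  · intro h k
    induction k with
    | zero =>
      intro hk
      simp [List.getD_eq_getElem?_getD, List.getElem?_eq_getElem hk, List.getElem!_eq_getElem?_getD]
    | succ m ih =>
      intro hk
      have hm := ih (by omega)
      have hd := h (m + 1) hk (by omega)
      simp only [Nat.add_sub_cancel] at hd
      omega
  · intro h k hk hk0
    have h1 := h k hk
    have h2 := h (k - 1) (by omega)
    have : ((k - 1 : Nat) : Int) = (k : Int) - 1 := by omega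
    omega

-- B's list equality, characterised index-wise
lemma b_eq_all (s : List Int) :
    (s == (PySem.List.pyRange 0 (s.length : Int) 1).map (fun i => PySem.List.pyGetD s 0 0 + i)) =
      decide (∀ k : Nat, k < s.length → s[k]! = s.getD 0 0 + k) := by
  rw [Bool.eq_iff_iff]
  simp only [beq_iff_eq, decide_eq_true_eq]
  constructor
  · intro heq k hk
    have h := congrArg (fun l => l[k]?) heq
    simp only at h
    rw [PySem.List.getElem?_map_pyRange_zero _ _ _ hk] at h
    rw [List.getElem!_eq_getElem?_getD, h, Option.getD_some, PySem.List.pyGetD_zero]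
  · intro hq
    apply List.ext_getElem
    · simp [PySem.List.length_pyRange_one]
    · intro k hk hk'
      rw [List.getElem_map, PySem.List.getElem_pyRange_one]
      have := hq k hk
      rw [List.getElem!_eq_getElem?_getD, List.getElem?_eq_getElem hk, Option.getD_some] at this
      rw [this, PySem.List.pyGetD_zero]
      ring

-- A's loop, characterised index-wise
lemma a_eq_all (s : List Int) :
    cnLoopA s (PySem.List.pyRange 0 (s.length : Int) 1) =
      decide (∀ k : Nat, k < s.length → k ≠ 0 → s[k]! - s[k - 1]! = 1) := by
  rw [cnLoopA_eq_all, Bool.eq_iff_iff]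
  simp only [List.all_eq_true, decide_eq_true_eq, Bool.not_eq_eq_eq_not, Bool.not_true,
    decide_eq_false_iff_not, not_and, ne_eq, not_not]
  constructor
  · intro h k hk hk0
    have hi : (k : Int) ∈ PySem.List.pyRange 0 (s.length : Int) 1 := by
      rw [PySem.List.mem_pyRange_one]; omega
    have := h _ hi (by exact_mod_cast hk0)
    rw [PySem.List.pyGetD_eq_getElem s 0 (by omega) (by exact_mod_cast hk),
        PySem.List.pyGetD_eq_getElem s 0 (by omega) (by omega)] at this
    have h2 : ((k : Int) - 1).toNat = k - 1 := by omega
    simp only [Int.toNat_natCast, h2] at this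
    rw [List.getElem!_eq_getElem?_getD, List.getElem?_eq_getElem hk,
        List.getElem!_eq_getElem?_getD, List.getElem?_eq_getElem (by omega : k - 1 < s.length)]
    simpa using this
  · intro h i hi hi0
    rw [PySem.List.mem_pyRange_one] at hi
    have hk : i.toNat < s.length := by omega
    have hk0 : i.toNat ≠ 0 := by omega
    have := h i.toNat hk hk0
    rw [List.getElem!_eq_getElem?_getD, List.getElem?_eq_getElem hk,
        List.getElem!_eq_getElem?_getD,
        List.getElem?_eq_getElem (by omega : i.toNat - 1 < s.length)] at this
    rw [PySem.List.pyGetD_eq_getElem s 0 (by omega) (by omega),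
        PySem.List.pyGetD_eq_getElem s 0 (by omega) (by omega)]
    have h2 : (i - 1).toNat = i.toNat - 1 := by omega
    simp only [h2]
    simpa using this

lemma main_lemma (s : List Int) :
    (if s.length = 1 then true
     else cnLoopA s (PySem.List.pyRange 0 (s.length : Int) 1)) =
      (s == (PySem.List.pyRange 0 (s.length : Int) 1).map (fun i => PySem.List.pyGetD s 0 0 + i)) := by
  by_cases h1 : s.length = 1
  · obtain ⟨a, rfl⟩ := List.length_eq_one_iff.mp h1
    have hr : PySem.List.pyRange 0 (1 : Int) 1 = [0] := by
      simpa using PySem.List.pyRange_one_singleton 0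
    simp [hr, PySem.List.pyGetD_zero]
  · rw [if_neg h1, a_eq_all, b_eq_all, decide_eq_decide]
    exact adjacent_iff_progression s

-- ===== VERDICT (by name: the statement is the Claim_ definition above) =====
theorem consecutive_numbers_spec : Claim_equal_consecutive_numbers := by
  intro num_list _
  unfold Spec_consecutive_numbers consecutive_numbers consecutive_numbers_alt
  exact main_lemma (PySem.List.sorted num_list (fun x => x))
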